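-- pv_equiv track=rewrite | github.com/ilto86/SoftUni-Python | Python Advanced/Exercises/Workshop - Exercises/main.py | get_position_mapping
-- ===== SOURCE A (Python) =====
-- def get_position_mapping(board):
--     result = {}
--     idx = 1
--     for row in range(len(board)):
--         for col in range(len(board)):
--             result[idx] = (row, col)
--             idx += 1
--     return result
--
-- board = []
-- ===== SOURCE B (Python) =====
-- def get_position_mapping(board):
--     n = len(board)
--     return {i + 1: divmod(i, n) for i in range(n * n)}
-- ===== Notes on version B (the rewrite author's own statement) =====
-- stated objective: simpler
-- what changed: Replaces the nested row/col loops with a manual idx counter by a single dict comprehension over range(n*n) that derives (row, col) from the index with divmod.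
import Mathlib
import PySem

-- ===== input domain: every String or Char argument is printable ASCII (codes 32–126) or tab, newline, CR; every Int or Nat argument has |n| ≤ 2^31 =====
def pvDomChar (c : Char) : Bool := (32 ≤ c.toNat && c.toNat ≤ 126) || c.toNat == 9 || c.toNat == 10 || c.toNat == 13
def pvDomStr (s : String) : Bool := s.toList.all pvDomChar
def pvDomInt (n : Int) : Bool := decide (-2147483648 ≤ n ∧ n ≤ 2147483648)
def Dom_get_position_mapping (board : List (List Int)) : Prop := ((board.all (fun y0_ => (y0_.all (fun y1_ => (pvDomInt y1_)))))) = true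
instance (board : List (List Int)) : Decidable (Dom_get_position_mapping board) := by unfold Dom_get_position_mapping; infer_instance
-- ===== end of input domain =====

-- B replaces A's nested row/col loops with a manual idx counter by a single pass over
-- range(n*n) deriving (row, col) from the index via divmod; objective: simpler.

-- ===== PORT A =====
def get_position_mapping (board : List (List Int)) : List (Int × Int × Int) :=
  let st := (PySem.List.pyRange 0 (board.length : Int) 1).foldl
    (fun (st : PySem.Dict Int (Int × Int) × Int) row =>
      (PySem.List.pyRange 0 (board.length : Int) 1).foldl
        (fun st col => (st.1.insert st.2 (row, col), st.2 + 1)) st)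
    (PySem.Dict.empty, 1)
  st.1.items

-- ===== PORT B =====
def get_position_mapping_alt (board : List (List Int)) : List (Int × Int × Int) :=
  let n : Int := board.length
  (PySem.List.pyRange 0 (n * n) 1).map
    (fun i => (i + 1, PySem.Int.floordiv i n, PySem.Int.mod i n))

-- ===== PRECONDITION & SPEC =====
def Spec_get_position_mapping (board : List (List Int)) (out : List (Int × Int × Int)) : Prop := out = get_position_mapping_alt board
instance (board : List (List Int)) (out : List (Int × Int × Int)) : Decidable (Spec_get_position_mapping board out) := by unfold Spec_get_position_mapping; infer_instance

-- ===== CLAIM (what is proved, stated in full; the proofs are below) =====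
def Claim_equal_get_position_mapping : Prop := ∀ (board : List (List Int)), Dom_get_position_mapping board → Spec_get_position_mapping board (get_position_mapping board)

-- ===== LEMMAS AND PROOFS =====

theorem pv_inner_fold (n row : Int) :
    ∀ (len : Nat) (c0 : Int), c0 + len = n →
    ∀ (d : PySem.Dict Int (Int × Int)) (idx : Int),
    (∀ k, idx ≤ k → d.contains k = false) →
    ((PySem.List.pyRange c0 n 1).foldl
       (fun (st : PySem.Dict Int (Int × Int) × Int) c => (st.1.insert st.2 (row, c), st.2 + 1)) (d, idx)).2
      = idx + (n - c0) ∧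
    ((PySem.List.pyRange c0 n 1).foldl
       (fun (st : PySem.Dict Int (Int × Int) × Int) c => (st.1.insert st.2 (row, c), st.2 + 1)) (d, idx)).1.items
      = d.items ++ (PySem.List.pyRange c0 n 1).map (fun c => (idx + (c - c0), row, c)) ∧
    (∀ k, idx + (n - c0) ≤ k →
      ((PySem.List.pyRange c0 n 1).foldl
         (fun (st : PySem.Dict Int (Int × Int) × Int) c => (st.1.insert st.2 (row, c), st.2 + 1)) (d, idx)).1.contains k = false) := by
  intro len
  induction len with
  | zero =>
    intro c0 h d idx hf
    rw [PySem.List.pyRange_one_eq_nil (by omega)]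
    simp
    exact ⟨by omega, fun k hk => hf k (by omega)⟩
  | succ m ih =>
    intro c0 h d idx hf
    rw [PySem.List.pyRange_one_cons (by omega)]
    simp only [List.foldl_cons, List.map_cons]
    have hfresh : ∀ k, idx + 1 ≤ k → (d.insert idx (row, c0)).contains k = false := by
      intro k hk
      rw [PySem.Dict.contains_insert]
      simp [hf k (by omega), show k ≠ idx by omega]
    obtain ⟨h1, h2, h3⟩ := ih (c0 + 1) (by omega) (d.insert idx (row, c0)) (idx + 1) hfresh
    refine ⟨by rw [h1]; omega, ?_, fun k hk => h3 k (by omega)⟩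
    rw [h2, PySem.Dict.items_insert_of_not_contains _ _ (hf idx (by omega))]
    have hmap : (PySem.List.pyRange (c0+1) n 1).map (fun c => (idx + 1 + (c - (c0 + 1)), row, c))
        = (PySem.List.pyRange (c0+1) n 1).map (fun c => (idx + (c - c0), row, c)) := by
      apply List.map_congr_left
      intro c _
      have : idx + 1 + (c - (c0 + 1)) = idx + (c - c0) := by omega
      rw [this]
    rw [hmap]
    have : idx + (c0 - c0) = idx := by omega
    simp

theorem pv_outer_fold (n : Int) :
    ∀ (len : Nat) (r0 : Int), 0 ≤ r0 → r0 + len = n →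
    ∀ (d : PySem.Dict Int (Int × Int)) (idx : Int),
    (∀ k, idx ≤ k → d.contains k = false) →
    ((PySem.List.pyRange r0 n 1).foldl
       (fun (st : PySem.Dict Int (Int × Int) × Int) row =>
         (PySem.List.pyRange 0 n 1).foldl
           (fun st c => (st.1.insert st.2 (row, c), st.2 + 1)) st) (d, idx)).1.items
      = d.items ++ (PySem.List.pyRange r0 n 1).flatMap
          (fun row => (PySem.List.pyRange 0 n 1).map
            (fun c => (idx + (row - r0) * n + c, row, c))) ∧
    ((PySem.List.pyRange r0 n 1).foldl
       (fun (st : PySem.Dict Int (Int × Int) × Int) row =>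
         (PySem.List.pyRange 0 n 1).foldl
           (fun st c => (st.1.insert st.2 (row, c), st.2 + 1)) st) (d, idx)).2
      = idx + (n - r0) * n ∧
    (∀ k, idx + (n - r0) * n ≤ k →
      ((PySem.List.pyRange r0 n 1).foldl
         (fun (st : PySem.Dict Int (Int × Int) × Int) row =>
           (PySem.List.pyRange 0 n 1).foldl
             (fun st c => (st.1.insert st.2 (row, c), st.2 + 1)) st) (d, idx)).1.contains k = false) := by
  intro len
  induction len with
  | zero =>
    intro r0 hr0 h d idx hf
    have h0 : r0 = n := by omega
    subst h0
    rw [PySem.List.pyRange_one_eq_nil le_rfl]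
    simp
    exact fun k hk => hf k (by omega)
  | succ m ih =>
    intro r0 hr0 h d idx hf
    have hnpos : 0 < n := by omega
    rw [show PySem.List.pyRange r0 n 1 = r0 :: PySem.List.pyRange (r0 + 1) n 1 from
      PySem.List.pyRange_one_cons (by omega)]
    simp only [List.foldl_cons, List.flatMap_cons]
    obtain ⟨i1, i2, i3⟩ := pv_inner_fold n r0 n.toNat 0 (by omega) d idx hf
    set st1 := (PySem.List.pyRange 0 n 1).foldl
        (fun (st : PySem.Dict Int (Int × Int) × Int) c => (st.1.insert st.2 (r0, c), st.2 + 1)) (d, idx) with hst1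
    have hst1' : st1 = (st1.1, idx + n) := by
      rw [Prod.ext_iff]; exact ⟨rfl, by rw [i1]; omega⟩
    rw [hst1']
    obtain ⟨o1, o2, o3⟩ := ih (r0 + 1) (by omega) (by omega) st1.1 (idx + n)
      (fun k hk => i3 k (by omega))
    refine ⟨?_, by rw [o2]; ring, fun k hk => o3 k (by nlinarith)⟩
    rw [o1, i2]
    have hA : (fun c => (idx + (c - 0), r0, c)) = (fun c : Int => (idx + (r0 - r0) * n + c, r0, c)) := by
      funext c; congr 1; ring
    have hB : (fun row => (PySem.List.pyRange 0 n 1).map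
          (fun c => (idx + n + (row - (r0 + 1)) * n + c, row, c)))
        = (fun row => (PySem.List.pyRange 0 n 1).map
          (fun c => (idx + (row - r0) * n + c, row, c))) := by
      funext r
      have : (fun c => (idx + n + (r - (r0 + 1)) * n + c, r, c))
          = (fun c : Int => (idx + (r - r0) * n + c, r, c)) := by
        funext c; congr 1; ring
      rw [this]
    rw [hA, hB]
    simp [List.append_assoc]

theorem pv_b_decomp (n : Int) (hn : 0 < n) :
    ∀ (m : Nat), (m : Int) ≤ n →
    (PySem.List.pyRange 0 ((m : Int) * n) 1).map
        (fun i => (i + 1, PySem.Int.floordiv i n, PySem.Int.mod i n))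
      = (PySem.List.pyRange 0 (m : Int) 1).flatMap
          (fun row => (PySem.List.pyRange 0 n 1).map
            (fun c => (1 + row * n + c, row, c))) := by
  intro m
  induction m with
  | zero =>
    intro _
    simp [PySem.List.pyRange_one_eq_nil]
  | succ k ih =>
    intro hm
    have hk : (k : Int) ≤ n := by push_cast at hm ⊢; omega
    have h1 : ((k + 1 : Nat) : Int) * n = (k : Int) * n + n := by push_cast; ring
    have h2 : (0 : Int) ≤ (k : Int) * n := by positivity
    rw [h1,
      PySem.List.pyRange_one_append 0 ((k : Int) * n) ((k : Int) * n + n) h2 (by omega),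
      show ((k + 1 : Nat) : Int) = (k : Int) + 1 by push_cast; ring,
      PySem.List.pyRange_one_succ_right (by omega)]
    rw [List.map_append, List.flatMap_append, ih hk]
    congr 1
    -- the last block: range(k*n, k*n+n) maps under divmod to row k
    rw [List.flatMap_singleton]
    have hseg : PySem.List.pyRange ((k : Int) * n) ((k : Int) * n + n) 1
        = (PySem.List.pyRange 0 n 1).map (fun c => (k : Int) * n + c) := by
      rw [PySem.List.pyRange_one, PySem.List.pyRange_one]
      simp [List.map_map, Function.comp]
    rw [hseg, List.map_map]
    apply List.map_congr_left
    intro c hc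
    rw [PySem.List.mem_pyRange_one] at hc
    have hfd : PySem.Int.floordiv ((k : Int) * n + c) n = (k : Int) := by
      rw [PySem.Int.floordiv_eq_iff_of_pos hn]
      constructor <;> nlinarith [hc.1, hc.2]
    have hmd : PySem.Int.mod ((k : Int) * n + c) n = c := by
      have := PySem.Int.floordiv_mul_add_mod ((k : Int) * n + c) n
      rw [hfd] at this; omega
    simp only [Function.comp]
    rw [hfd, hmd]
    congr 1
    ring

theorem pv_main (board : List (List Int)) :
    get_position_mapping board = get_position_mapping_alt board := by
  unfold get_position_mapping get_position_mapping_alt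
  simp only []

  set n : Int := (board.length : Int) with hn
  obtain ⟨o1, o2, o3⟩ := pv_outer_fold n board.length 0 le_rfl (by omega) PySem.Dict.empty 1
    (fun k _ => by simp)
  have hempty : (PySem.Dict.empty : PySem.Dict Int (Int × Int)).items = [] := rfl
  rw [o1, hempty, List.nil_append]
  rcases Nat.eq_zero_or_pos board.length with h0 | hpos
  · rw [hn, h0]
    simp [PySem.List.pyRange_one_eq_nil]
  · have hnpos : 0 < n := by omega
    have := pv_b_decomp n hnpos board.length (by omega)
    rw [show n * n = (board.length : Int) * n from by rw [hn], this]
    have : (fun row => (PySem.List.pyRange 0 n 1).map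
          (fun c => (1 + (row - 0) * n + c, row, c)))
        = (fun row => (PySem.List.pyRange 0 n 1).map
          (fun c : Int => (1 + row * n + c, row, c))) := by
      funext r
      have : (fun c => (1 + (r - 0) * n + c, r, c)) = (fun c : Int => (1 + r * n + c, r, c)) := by
        funext c; congr 1; ring
      rw [this]
    rw [this, hn]

-- ===== VERDICT (by name: the statement is the Claim_ definition above) =====
theorem get_position_mapping_spec : Claim_equal_get_position_mapping := by
  intro board _
  exact pv_main board
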